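-- pv_equiv track=rewrite | github.com/siaolu/robin_stocks | robin_stocks/revisions/tda/__init__.py | _get_module_and_attr
-- ===== SOURCE A (Python) =====
-- def _get_module_and_attr(name: str):
--     """Helper function to determine which module an attribute belongs to."""
--     module_map = {
--         'accounts': ['get_account', 'get_accounts', 'get_transaction', 'get_transactions'],
--         'authentication': ['generate_encryption_passcode', 'login', 'login_first_time'],
--         'helper': ['get_login_state', 'get_order_number', 'request_data', 'request_delete', 'request_get', 'request_headers', 'request_post'],
--         'markets': ['get_hours_for_market', 'get_hours_for_markets', 'get_movers'],
--         'orders': ['cancel_order', 'get_order', 'get_orders_for_account', 'place_order'],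
--         'stocks': ['get_instrument', 'get_option_chains', 'get_price_history', 'get_quote', 'get_quotes', 'search_instruments'],
--     }
--     for module, attrs in module_map.items():
--         if name in attrs:
--             return module, name
--     raise ValueError(f"Unknown attribute: {name}")
-- ===== SOURCE B (Python) =====
-- _ATTR_TO_MODULE = {
--     'get_account': 'accounts', 'get_accounts': 'accounts',
--     'get_transaction': 'accounts', 'get_transactions': 'accounts',
--     'generate_encryption_passcode': 'authentication', 'login': 'authentication',
--     'login_first_time': 'authentication',
--     'get_login_state': 'helper', 'get_order_number': 'helper', 'request_data': 'helper',
--     'request_delete': 'helper', 'request_get': 'helper', 'request_headers': 'helper',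
--     'request_post': 'helper',
--     'get_hours_for_market': 'markets', 'get_hours_for_markets': 'markets', 'get_movers': 'markets',
--     'cancel_order': 'orders', 'get_order': 'orders', 'get_orders_for_account': 'orders',
--     'place_order': 'orders',
--     'get_instrument': 'stocks', 'get_option_chains': 'stocks', 'get_price_history': 'stocks',
--     'get_quote': 'stocks', 'get_quotes': 'stocks', 'search_instruments': 'stocks',
-- }
--
-- def _get_module_and_attr(name: str):
--     """Helper function to determine which module an attribute belongs to."""
--     try:
--         return _ATTR_TO_MODULE[name], name
--     except KeyError:
--         raise ValueError(f"Unknown attribute: {name}") from None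
-- ===== Notes on version B (the rewrite author's own statement) =====
-- stated objective: simpler
-- what changed: Replaces the loop over a module->attribute-list map (with an inner list scan per module) by a single inverted attribute->module dictionary built once at import time, so the function body is one O(1) lookup with no loop.
-- outside the precondition, e.g. on _get_module_and_attr('Unknown attribute'): A raises ValueError, B raises ValueError
import Mathlib
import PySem

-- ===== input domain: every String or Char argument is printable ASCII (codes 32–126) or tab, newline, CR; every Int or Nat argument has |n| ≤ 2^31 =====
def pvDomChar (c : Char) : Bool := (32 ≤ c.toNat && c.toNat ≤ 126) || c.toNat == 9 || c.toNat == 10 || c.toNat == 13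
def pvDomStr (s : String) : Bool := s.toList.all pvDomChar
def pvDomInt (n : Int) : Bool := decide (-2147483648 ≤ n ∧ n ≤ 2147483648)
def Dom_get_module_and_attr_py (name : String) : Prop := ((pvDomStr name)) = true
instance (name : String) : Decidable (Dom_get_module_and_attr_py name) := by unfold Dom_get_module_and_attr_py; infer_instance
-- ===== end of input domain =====

-- B replaces A's loop over a module→attribute-list map by one inverted flat dictionary lookup (objective: simpler).
-- Both raise ValueError on unknown names; those inputs are excluded by Pre_.

-- ===== PORT A =====
-- A's module_map dict, in insertion order.
def pvModuleMap : List (String × List String) :=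
  [ ("accounts", ["get_account", "get_accounts", "get_transaction", "get_transactions"]),
    ("authentication", ["generate_encryption_passcode", "login", "login_first_time"]),
    ("helper", ["get_login_state", "get_order_number", "request_data", "request_delete", "request_get", "request_headers", "request_post"]),
    ("markets", ["get_hours_for_market", "get_hours_for_markets", "get_movers"]),
    ("orders", ["cancel_order", "get_order", "get_orders_for_account", "place_order"]),
    ("stocks", ["get_instrument", "get_option_chains", "get_price_history", "get_quote", "get_quotes", "search_instruments"]) ]

-- the 'for module, attrs in module_map.items():' loop; the [] case is the ValueError, outside Pre_.
def pvLoopA (name : String) : List (String × List String) → String × String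
  | [] => ("", "")
  | (module, attrs) :: rest => if attrs.contains name then (module, name) else pvLoopA name rest

def get_module_and_attr_py (name : String) : String × String :=
  pvLoopA name pvModuleMap

-- ===== PORT B =====
-- B's inverted flat dict _ATTR_TO_MODULE (insertion order as in Source B).
def pvAttrToModule : PySem.Dict String String :=
  PySem.Dict.ofList
  [ ("get_account", "accounts"), ("get_accounts", "accounts"),
    ("get_transaction", "accounts"), ("get_transactions", "accounts"),
    ("generate_encryption_passcode", "authentication"), ("login", "authentication"),
    ("login_first_time", "authentication"),
    ("get_login_state", "helper"), ("get_order_number", "helper"), ("request_data", "helper"),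
    ("request_delete", "helper"), ("request_get", "helper"), ("request_headers", "helper"),
    ("request_post", "helper"),
    ("get_hours_for_market", "markets"), ("get_hours_for_markets", "markets"), ("get_movers", "markets"),
    ("cancel_order", "orders"), ("get_order", "orders"), ("get_orders_for_account", "orders"),
    ("place_order", "orders"),
    ("get_instrument", "stocks"), ("get_option_chains", "stocks"), ("get_price_history", "stocks"),
    ("get_quote", "stocks"), ("get_quotes", "stocks"), ("search_instruments", "stocks") ]

def get_module_and_attr_py_alt (name : String) : String × String :=
  match PySem.Dict.get? pvAttrToModule name with
  | some m => (m, name)         -- _ATTR_TO_MODULE[name], name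
  | none => ("", "")            -- KeyError → ValueError, outside Pre_

-- ===== PRECONDITION & SPEC =====
-- Pre_ excludes exactly the names on which A raises ValueError ("Unknown attribute").
def Pre_get_module_and_attr_py (name : String) : Prop :=
  name ∈ (pvModuleMap.flatMap Prod.snd)
instance (name : String) : Decidable (Pre_get_module_and_attr_py name) := by
  unfold Pre_get_module_and_attr_py; infer_instance

def pvWitness_get_module_and_attr_py : String := "login"

def Spec_get_module_and_attr_py (name : String) (out : String × String) : Prop := out = get_module_and_attr_py_alt name
instance (name : String) (out : String × String) : Decidable (Spec_get_module_and_attr_py name out) := by unfold Spec_get_module_and_attr_py; infer_instance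

-- ===== CLAIM (what is proved, stated in full; the proofs are below) =====
def Claim_equal_get_module_and_attr_py : Prop := ∀ (name : String), Dom_get_module_and_attr_py name → Pre_get_module_and_attr_py name → Spec_get_module_and_attr_py name (get_module_and_attr_py name)

-- ===== LEMMAS AND PROOFS =====

-- ===== VERDICT (by name: the statement is the Claim_ definition above) =====
theorem get_module_and_attr_py_spec : Claim_equal_get_module_and_attr_py := by
  intro name _ hpre
  unfold Pre_get_module_and_attr_py pvModuleMap at hpre
  simp only [List.flatMap_cons, List.flatMap_nil, List.append_nil, List.cons_append,
    List.nil_append, List.mem_cons, List.not_mem_nil, or_false] at hpre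
  unfold Spec_get_module_and_attr_py
  rcases hpre with rfl|rfl|rfl|rfl|rfl|rfl|rfl|rfl|rfl|rfl|rfl|rfl|rfl|rfl|rfl|rfl|rfl|rfl|rfl|rfl|rfl|rfl|rfl|rfl|rfl|rfl|rfl <;> rfl
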